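-- pv_equiv track=rewrite | github.com/BBC-Esq/Fast-PyOCR | module_pdf_ocr.py | remove_line_break_hyphens
-- ===== SOURCE A (Python) =====
-- def remove_line_break_hyphens(text):
--     """
--     Removes hyphenated line breaks from a block of text by joining words split across lines.
--     """
--     lines = text.split('\n')
--     processed_lines = []
--     i = 0
--     while i < len(lines):
--         current_line = lines[i].rstrip()
--         if current_line.endswith('-') and i < len(lines) - 1:
--             next_line = lines[i+1].lstrip()
--             if next_line and next_line[0].islower():
--                 joined_word = current_line[:-1] + next_line.split(' ', 1)[0]
--                 remaining_next_line = ' '.join(next_line.split(' ')[1:])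
--                 processed_lines.append(joined_word)
--                 if remaining_next_line:
--                     lines[i+1] = remaining_next_line
--                 else:
--                     i += 1
--             else:
--                 processed_lines.append(current_line)
--         else:
--             processed_lines.append(current_line)
--         i += 1
--     return '\n'.join(processed_lines)
-- ===== SOURCE B (Python) =====
-- from collections import deque
--
-- def remove_line_break_hyphens(text):
--     queue = deque(text.split('\n'))
--     out = []
--     while queue:
--         cur = queue.popleft().rstrip()
--         if cur.endswith('-') and queue:
--             nl = queue[0].lstrip()
--             if nl and nl[0].islower():
--                 words = nl.split(' ')
--                 out.append(cur[:-1] + words[0])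
--                 queue.popleft()
--                 rem = ' '.join(words[1:])
--                 if rem:
--                     queue.appendleft(rem)
--                 continue
--         out.append(cur)
--     return '\n'.join(out)
-- ===== Notes on version B (the rewrite author's own statement) =====
-- stated objective: simpler
-- what changed: Replaces A's mutable index walk with in-place overwrite of lines[i+1] and conditional double increment by a deque consumed from the front, pushing the leftover words of a joined line back onto the queue for re-processing.
import Mathlib
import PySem

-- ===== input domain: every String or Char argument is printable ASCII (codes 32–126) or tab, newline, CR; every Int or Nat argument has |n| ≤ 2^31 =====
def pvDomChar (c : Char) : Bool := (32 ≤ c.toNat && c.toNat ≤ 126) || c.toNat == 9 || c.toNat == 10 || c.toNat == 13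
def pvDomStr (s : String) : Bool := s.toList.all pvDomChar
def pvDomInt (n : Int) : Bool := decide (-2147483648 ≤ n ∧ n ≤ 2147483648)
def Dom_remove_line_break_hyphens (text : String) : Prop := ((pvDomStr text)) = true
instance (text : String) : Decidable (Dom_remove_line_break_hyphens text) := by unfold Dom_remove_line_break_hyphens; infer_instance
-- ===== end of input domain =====

-- B rewrites A's mutable-index walk (with in-place overwrite of lines[i+1]) as a queue:
-- consume lines from the front, pushing leftover words back for re-processing (objective: simpler).

-- ===== PORT A =====
-- literal port of A's while-loop: index i over a mutable list of lines
def pvLoopA (lines : List (List Char)) (i : Nat) (processed : List (List Char)) :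
    List (List Char) :=
  if h : i < lines.length then
    let current := PySem.Chars.rstrip lines[i]
    if PySem.Chars.endswith current ['-'] && decide (i < lines.length - 1) then
      let next := PySem.Chars.lstrip (lines.getD (i + 1) [])
      match next with
      | c :: _ =>
        if PySem.Chars.islower c then
          let joined := current.dropLast ++ (PySem.Chars.splitOnMax next [' '] 1).headD []
          let remaining := PySem.Chars.join [' '] (PySem.Chars.splitOn next [' ']).tail
          if remaining ≠ [] then
            pvLoopA (lines.set (i + 1) remaining) (i + 1) (processed ++ [joined])
          else
            pvLoopA lines (i + 1 + 1) (processed ++ [joined])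
        else
          pvLoopA lines (i + 1) (processed ++ [current])
      | [] => pvLoopA lines (i + 1) (processed ++ [current])
    else
      pvLoopA lines (i + 1) (processed ++ [current])
  else processed
termination_by lines.length - i
decreasing_by all_goals first | (simp [List.length_set]; omega) | omega

def remove_line_break_hyphens (text : String) : String :=
  let lines := PySem.Chars.splitOn text.toList ['\n']
  String.ofList (PySem.Chars.join ['\n'] (pvLoopA lines 0 []))

-- ===== PORT B =====
-- literal port of B: a queue consumed from the front, leftover words pushed back on
def pvLoopB : List (List Char) → List (List Char) → List (List Char)
  | [], out => out
  | [cur], out => out ++ [PySem.Chars.rstrip cur]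
  | cur :: front :: queue, out =>
    let c := PySem.Chars.rstrip cur
    if PySem.Chars.endswith c ['-'] then
      let nl := PySem.Chars.lstrip front
      match nl with
      | ch :: _ =>
        if PySem.Chars.islower ch then
          let words := PySem.Chars.splitOn nl [' ']
          let out' := out ++ [c.dropLast ++ words.headD []]
          let rem := PySem.Chars.join [' '] words.tail
          if rem ≠ [] then pvLoopB (rem :: queue) out'
          else pvLoopB queue out'
        else pvLoopB (front :: queue) (out ++ [c])
      | [] => pvLoopB (front :: queue) (out ++ [c])
    else pvLoopB (front :: queue) (out ++ [c])
termination_by q _ => q.length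
decreasing_by all_goals simp

def remove_line_break_hyphens_alt (text : String) : String :=
  let queue := PySem.Chars.splitOn text.toList ['\n']
  String.ofList (PySem.Chars.join ['\n'] (pvLoopB queue []))

-- ===== PRECONDITION & SPEC =====
def Spec_remove_line_break_hyphens (text : String) (out : String) : Prop := out = remove_line_break_hyphens_alt text
instance (text : String) (out : String) : Decidable (Spec_remove_line_break_hyphens text out) := by unfold Spec_remove_line_break_hyphens; infer_instance

-- ===== CLAIM (what is proved, stated in full; the proofs are below) =====
def Claim_equal_remove_line_break_hyphens : Prop := ∀ (text : String), Dom_remove_line_break_hyphens text → Spec_remove_line_break_hyphens text (remove_line_break_hyphens text)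

-- ===== LEMMAS AND PROOFS =====

-- splitOn.go prepends its accumulator (reversed) to the result
lemma splitOn_go_acc (sep : List Char) : ∀ (fuel : Nat) (l cur : List Char) (accs : List (List Char)),
    PySem.Chars.splitOn.go sep fuel l cur accs = accs.reverse ++ PySem.Chars.splitOn.go sep fuel l cur [] := by
  intro fuel
  induction fuel with
  | zero => intro l cur accs; simp [PySem.Chars.splitOn.go]
  | succ n ih =>
    intro l cur accs
    cases l with
    | nil => simp [PySem.Chars.splitOn.go]
    | cons c rest =>
      simp only [PySem.Chars.splitOn.go]
      split_ifs with h
      · rw [ih _ _ (cur.reverse :: accs), ih _ _ ([cur.reverse] : List (List Char))]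
        simp
      · exact ih _ _ accs

-- splitOnMax.go with the budget exhausted returns the rest as one piece
lemma splitOnMax_go_zero (sep : List Char) (n : Nat) (l cur : List Char) (accs : List (List Char)) :
    PySem.Chars.splitOnMax.go sep n 0 l cur accs = ((cur.reverse ++ l) :: accs).reverse := by
  cases n with
  | zero => simp [PySem.Chars.splitOnMax.go]
  | succ m => cases l <;> simp [PySem.Chars.splitOnMax.go]

-- the first piece of split(' ', 1) is the first piece of split(' ')
lemma splitOnMax_one_head (sep : List Char) (s : List Char) :
    (PySem.Chars.splitOnMax s sep 1).headD [] = (PySem.Chars.splitOn s sep).headD [] := by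
  have key : ∀ (fuel : Nat) (l cur : List Char),
      (PySem.Chars.splitOnMax.go sep fuel 1 l cur []).headD [] =
      (PySem.Chars.splitOn.go sep fuel l cur []).headD [] := by
    intro fuel
    induction fuel with
    | zero => intro l cur; simp [PySem.Chars.splitOnMax.go, PySem.Chars.splitOn.go]
    | succ n ih =>
      intro l cur
      cases l with
      | nil => simp [PySem.Chars.splitOnMax.go, PySem.Chars.splitOn.go]
      | cons c rest =>
        by_cases h : sep.isPrefixOf (c :: rest) = true
        · simp only [PySem.Chars.splitOnMax.go, PySem.Chars.splitOn.go, h, if_true,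
            if_neg (by decide : ¬(1 = 0))]
          rw [splitOnMax_go_zero, splitOn_go_acc]
          simp
        · simp only [PySem.Chars.splitOnMax.go, PySem.Chars.splitOn.go, h]
          exact ih _ _
  simp only [PySem.Chars.splitOnMax, PySem.Chars.splitOn, if_neg (by decide : ¬((1:Int) < 0))]
  exact key _ _ _

-- A's indexed walk over `lines` equals B's queue walk over the suffix `lines.drop i`
lemma loop_agree : ∀ (n : Nat) (lines : List (List Char)) (i : Nat) (acc : List (List Char)),
    lines.length - i ≤ n → pvLoopA lines i acc = pvLoopB (lines.drop i) acc := by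
  intro n
  induction n with
  | zero =>
    intro lines i acc h
    rw [pvLoopA, dif_neg (by omega), List.drop_eq_nil_of_le (by omega)]
    simp [pvLoopB]
  | succ n ih =>
    intro lines i acc h
    by_cases hi : i < lines.length
    · have hdrop : lines.drop i = lines[i] :: lines.drop (i + 1) := List.drop_eq_getElem_cons hi
      rw [pvLoopA, dif_pos hi]
      by_cases hi1 : i + 1 < lines.length
      · have hdrop1 : lines.drop (i + 1) = lines[i + 1] :: lines.drop (i + 2) :=
          List.drop_eq_getElem_cons hi1
        have hgetD : lines.getD (i + 1) [] = lines[i + 1] := List.getD_eq_getElem lines [] hi1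
        have hdec : decide (i < lines.length - 1) = true := decide_eq_true (by omega)
        rw [hdrop, hdrop1]
        simp only [pvLoopB, hgetD, hdec, Bool.and_true]
        by_cases hb : PySem.Chars.endswith (PySem.Chars.rstrip lines[i]) ['-'] = true
        · simp only [hb, if_true]
          cases hnl : PySem.Chars.lstrip lines[i + 1] with
          | nil =>
            rw [ih lines (i + 1) _ (by omega), hdrop1]
          | cons ch tl =>
            by_cases hl : PySem.Chars.islower ch = true
            · simp only [hl, if_true]
              by_cases hrem :
                  PySem.Chars.join [' '] (PySem.Chars.splitOn (ch :: tl) [' ']).tail ≠ []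
              · simp only [if_pos hrem]
                rw [splitOnMax_one_head]
                rw [ih (lines.set (i + 1)
                    (PySem.Chars.join [' '] (PySem.Chars.splitOn (ch :: tl) [' ']).tail))
                    (i + 1) _ (by rw [List.length_set]; omega)]
                congr 1
                rw [List.drop_set, if_neg (by omega), hdrop1, Nat.sub_self, List.set_cons_zero]
              · simp only [if_neg hrem]
                rw [splitOnMax_one_head]
                rw [ih lines (i + 1 + 1) _ (by omega)]
            · simp only [hl, Bool.false_eq_true, if_false]
              rw [ih lines (i + 1) _ (by omega), hdrop1]
        · simp only [hb, if_false, Bool.false_eq_true]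
          rw [ih lines (i + 1) _ (by omega), hdrop1]
      · have hdrop1 : lines.drop (i + 1) = ([] : List (List Char)) :=
          List.drop_eq_nil_of_le (by omega)
        have hdec : decide (i < lines.length - 1) = false := decide_eq_false (by omega)
        rw [hdrop, hdrop1]
        simp only [pvLoopB, hdec, Bool.and_false, Bool.false_eq_true, if_false]
        rw [ih lines (i + 1) _ (by omega), hdrop1]
        simp [pvLoopB]
    · rw [pvLoopA, dif_neg hi, List.drop_eq_nil_of_le (by omega)]
      simp [pvLoopB]

-- ===== VERDICT (by name: the statement is the Claim_ definition above) =====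
theorem remove_line_break_hyphens_spec : Claim_equal_remove_line_break_hyphens := by
  intro text _
  unfold Spec_remove_line_break_hyphens remove_line_break_hyphens remove_line_break_hyphens_alt
  have := loop_agree (PySem.Chars.splitOn text.toList ['\n']).length
    (PySem.Chars.splitOn text.toList ['\n']) 0 [] (by omega)
  simp at this
  simp [this]
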